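-- pv_equiv track=rewrite | github.com/rodrikmenezes/PythonCodeSignal | Intro/2 Edge of the Ocean/8 AreSimilar 5.py | solution
-- ===== SOURCE A (Python) =====
-- def solution(a, b):
--     cont = 0
--     if sorted(a) == sorted(b):
--         for i in range(len(a)):
--             if a[i] != b[i]:
--                 cont += 1
--         return cont < 3
--     else:
--         return False
-- ===== SOURCE B (Python) =====
-- def solution(a, b):
--     if len(a) != len(b):
--         return False
--     diff = [i for i in range(len(a)) if a[i] != b[i]]
--     if len(diff) == 0:
--         return True
--     if len(diff) == 2:
--         i, j = diff
--         return a[i] == b[j] and a[j] == b[i]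
--     return False
-- ===== Notes on version B (the rewrite author's own statement) =====
-- stated objective: faster
-- what changed: Replaced A's sort-both-lists multiset comparison plus a mismatch-counting loop by a single pass collecting mismatch positions and a direct swap verification (0 mismatches, or exactly 2 that cross-match).
import Mathlib
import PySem

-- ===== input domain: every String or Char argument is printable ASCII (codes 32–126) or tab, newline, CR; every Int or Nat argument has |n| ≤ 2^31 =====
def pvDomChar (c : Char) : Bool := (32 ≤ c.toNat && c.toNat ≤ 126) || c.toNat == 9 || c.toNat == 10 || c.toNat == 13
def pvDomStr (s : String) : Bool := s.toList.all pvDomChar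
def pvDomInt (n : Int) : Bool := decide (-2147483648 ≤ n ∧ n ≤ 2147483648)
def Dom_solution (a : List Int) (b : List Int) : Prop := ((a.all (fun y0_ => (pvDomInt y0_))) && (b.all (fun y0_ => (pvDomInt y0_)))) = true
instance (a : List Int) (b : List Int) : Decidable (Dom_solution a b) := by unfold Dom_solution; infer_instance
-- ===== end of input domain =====

-- B replaces A's sort-based multiset test with a one-pass swap verification on the mismatch positions (faster in a timing run: O(n) vs O(n log n)).

-- ===== PORT A =====
-- a[i]/b[i] via pyGetD: exact here, since the loop runs only when sorted(a)==sorted(b) (hence equal lengths) and i < len(a).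
def solution (a : List Int) (b : List Int) : Bool :=
  if PySem.List.sorted a (fun x => x) false = PySem.List.sorted b (fun x => x) false then
    let cont : Int :=
      (PySem.List.pyRange 0 (a.length : Int) 1).foldl
        (fun cont i =>
          if PySem.List.pyGetD a i 0 ≠ PySem.List.pyGetD b i 0 then cont + 1 else cont) 0
    decide (cont < 3)
  else
    false

-- ===== PORT B =====
-- a[i]/b[i] via pyGetD: exact, since indexing happens only after the length guard and indices come from range(len(a)).
def solution_alt (a : List Int) (b : List Int) : Bool :=
  if a.length ≠ b.length then false
  else
    let diff := (PySem.List.pyRange 0 (a.length : Int) 1).filter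
      (fun i => PySem.List.pyGetD a i 0 ≠ PySem.List.pyGetD b i 0)
    match diff with
    | [] => true
    | [i, j] =>
        decide (PySem.List.pyGetD a i 0 = PySem.List.pyGetD b j 0 ∧
                PySem.List.pyGetD a j 0 = PySem.List.pyGetD b i 0)
    | _ => false

-- ===== PRECONDITION & SPEC =====
def Spec_solution (a : List Int) (b : List Int) (out : Bool) : Prop := out = solution_alt a b
instance (a : List Int) (b : List Int) (out : Bool) : Decidable (Spec_solution a b out) := by unfold Spec_solution; infer_instance

-- ===== CLAIM (what is proved, stated in full; the proofs are below) =====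
def Claim_equal_solution : Prop := ∀ (a : List Int) (b : List Int), Dom_solution a b → Spec_solution a b (solution a b)

-- ===== LEMMAS AND PROOFS =====

-- counting loop: foldl over if-increment equals length of the filtered list
theorem pvFoldlCount (p : Int → Prop) [DecidablePred p] (l : List Int) (c : Int) :
    l.foldl (fun acc x => if p x then acc + 1 else acc) c
      = c + ((l.filter (fun x => decide (p x))).length : Int) := by
  induction l generalizing c with
  | nil => simp
  | cons x t ih =>
    by_cases hx : p x
    · simp [List.foldl, hx, ih]; ring
    · simp [List.foldl, hx, ih]

-- the indexed pair map over range(len a) is exactly zip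
theorem pvMapPairRange (a b : List Int) (h : b.length = a.length) :
    (PySem.List.pyRange 0 (a.length : Int) 1).map
      (fun i => (PySem.List.pyGetD a i 0, PySem.List.pyGetD b i 0)) = a.zip b := by
  rw [PySem.List.pyRange_zero_nat, List.map_map]
  apply List.ext_getElem
  · simp [h]
  · intro k h1 h2
    simp only [List.getElem_map, List.getElem_range, Function.comp_apply,
      PySem.List.pyGetD_natCast, List.getElem_zip]
    simp at h1
    rw [List.getD_eq_getElem a 0 (by omega), List.getD_eq_getElem b 0 (by omega)]

-- permutation of two-element lists, characterised
theorem pvPermPair (x u y v : Int) :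
    [x, u].Perm [y, v] ↔ (x = y ∧ u = v) ∨ (x = v ∧ u = y) := by
  constructor
  · intro h
    have hx : x ∈ [y, v] := h.mem_iff.mp (by simp)
    simp at hx
    rcases hx with hx | hx
    · subst hx
      have := h.cons_inv
      simp [List.perm_singleton] at this
      exact Or.inl ⟨rfl, this⟩
    · subst hx
      have h2 : [x, u].Perm [x, y] := h.trans (List.Perm.swap x y [])
      have := h2.cons_inv
      simp [List.perm_singleton] at this
      exact Or.inr ⟨rfl, this⟩
  · rintro (⟨rfl, rfl⟩ | ⟨rfl, rfl⟩)
    · exact List.Perm.refl _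
    · exact List.Perm.swap u x []

-- a ~ b iff the mismatching pairs of zip a b have permuting projections
theorem pvPermIffMism (a b : List Int) (h : a.length = b.length) :
    a.Perm b ↔
      (((a.zip b).filter (fun q => decide ¬(q.1 = q.2))).map Prod.fst).Perm
      (((a.zip b).filter (fun q => decide ¬(q.1 = q.2))).map Prod.snd) := by
  set l := a.zip b with hl
  set p : Int × Int → Bool := fun q => decide ¬(q.1 = q.2) with hp
  have ha : List.map Prod.fst l = a := List.map_fst_zip h.le
  have hb : List.map Prod.snd l = b := List.map_snd_zip h.ge
  have hsp : (l.filter p ++ l.filter (fun x => !p x)).Perm l := List.filter_append_perm p l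
  have hM : (l.filter (fun x => !p x)).map Prod.fst = (l.filter (fun x => !p x)).map Prod.snd := by
    apply List.map_congr_left
    intro q hq
    have := List.of_mem_filter hq
    simp [hp] at this
    exact this
  have h1 : a.Perm ((l.filter p).map Prod.fst ++ (l.filter (fun x => !p x)).map Prod.fst) := by
    rw [← List.map_append, ← ha]
    exact (hsp.map Prod.fst).symm
  have h2 : b.Perm ((l.filter p).map Prod.snd ++ (l.filter (fun x => !p x)).map Prod.fst) := by
    rw [hM, ← List.map_append, ← hb]
    exact (hsp.map Prod.snd).symm
  constructor
  · intro hab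
    exact (List.perm_append_right_iff _).mp ((h1.symm.trans hab).trans h2)
  · intro hFS
    exact h1.trans (((List.perm_append_right_iff _).mpr hFS).trans h2.symm)

-- A computes: permutation test && mismatch count < 3
theorem pvSolutionEq (a b : List Int) :
    solution a b =
      (decide (a.Perm b) &&
       decide ((((PySem.List.pyRange 0 (a.length : Int) 1).filter
          (fun i => decide ¬(PySem.List.pyGetD a i 0 = PySem.List.pyGetD b i 0))).length : Int) < 3)) := by
  unfold solution
  by_cases hp : a.Perm b
  · rw [if_pos ((PySem.List.sorted_id_eq_sorted_id_iff_perm a b).mpr hp)]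
    simp only [hp, decide_true, Bool.true_and]
    rw [pvFoldlCount (fun i => ¬(PySem.List.pyGetD a i 0 = PySem.List.pyGetD b i 0))]
    simp
  · rw [if_neg (fun hc => hp ((PySem.List.sorted_id_eq_sorted_id_iff_perm a b).mp hc))]
    simp [hp]

-- ===== VERDICT (by name: the statement is the Claim_ definition above) =====
theorem solution_spec : Claim_equal_solution := by
  intro a b _
  unfold Spec_solution
  rw [pvSolutionEq]
  unfold solution_alt
  by_cases hlen : a.length = b.length
  · rw [if_neg (by simpa using hlen)]
    set D := (PySem.List.pyRange 0 (a.length : Int) 1).filter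
      (fun i => decide ¬(PySem.List.pyGetD a i 0 = PySem.List.pyGetD b i 0)) with hD
    have hmism : D.map (fun i => (PySem.List.pyGetD a i 0, PySem.List.pyGetD b i 0))
        = (a.zip b).filter (fun q => decide ¬(q.1 = q.2)) := by
      rw [hD, ← pvMapPairRange a b hlen.symm, List.filter_map]
      rfl
    have hperm := pvPermIffMism a b hlen
    rw [← hmism] at hperm
    have hmem : ∀ i ∈ D, ¬(PySem.List.pyGetD a i 0 = PySem.List.pyGetD b i 0) := by
      intro i hi
      have := List.of_mem_filter (hD ▸ hi)
      simpa using this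
    match hDc : D with
    | [] =>
      have : a.Perm b := hperm.mpr (by simp [hDc])
      simp [this]
    | [i] =>
      have hne := hmem i (by simp [hDc])
      have : ¬ a.Perm b := by
        intro hab
        have := hperm.mp hab
        simp [hDc, List.perm_singleton] at this
        exact hne this
      simp [this]
    | [i, j] =>
      have hnei := hmem i (by simp [hDc])
      have hnej := hmem j (by simp [hDc])
      have hiff : a.Perm b ↔
          (PySem.List.pyGetD a i 0 = PySem.List.pyGetD b j 0 ∧
           PySem.List.pyGetD a j 0 = PySem.List.pyGetD b i 0) := by
        rw [hperm]
        simp only [hDc, List.map_cons, List.map_nil]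
        rw [pvPermPair]
        constructor
        · rintro (⟨h1, h2⟩ | ⟨h1, h2⟩)
          · exact absurd h1 hnei
          · exact ⟨h1, h2⟩
        · rintro ⟨h1, h2⟩
          exact Or.inr ⟨h1, h2⟩
      by_cases hsw : PySem.List.pyGetD a i 0 = PySem.List.pyGetD b j 0 ∧
           PySem.List.pyGetD a j 0 = PySem.List.pyGetD b i 0
      · simp [hiff.mpr hsw, hsw]
      · simp [hsw]
        exact fun hab => hsw (hiff.mp hab)
    | i :: j :: k :: t =>
      have h3 : ¬ (((i :: j :: k :: t).length : Int) < 3) := by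
        simp
        omega
      simp
      intro _
      omega
  · have : ¬ a.Perm b := fun h => hlen h.length_eq
    rw [if_pos (by simpa using hlen)]
    simp [this]
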